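-- pv_equiv track=rewrite | github.com/chur-a/YLab | Homework 1/Номер 4.py | bananas
-- ===== SOURCE A (Python) =====
-- from itertools import combinations
--
-- def bananas(s) -> set:
--     result = set()
--     check = 'banana'
--     t = len(s) - len(check)
--     A = list(combinations((_ for _ in range(len(s))), t))
--     for inst in A:
--         inst = set(inst)
--         tmp_st = ''
--         for i in range(len(s)):
--             if i in inst:
--                 tmp_st += '-'
--             else:
--                 tmp_st += s[i]
--         if check == tmp_st.translate({ord('-'): None}):
--             result.add(tmp_st)
--     return result
-- ===== SOURCE B (Python) =====
-- def bananas(s) -> set: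
--     # Output-sensitive recursive subsequence matcher: only valid keep-position
--     # patterns are generated (dash-first), instead of testing all C(n, n-6) masks.
--     check = 'banana'
--     n = len(s)
--     if n < len(check):
--         raise ValueError('need at least %d characters' % len(check))
--     def go(i, j):
--         # maskings of s[i:] whose non-masked chars spell check[j:]
--         if len(check) - j > n - i:
--             return []
--         if i == n:
--             return ['']
--         res = ['-' + t for t in go(i + 1, j)]
--         if j < len(check) and s[i] == check[j]:
--             res += [s[i] + t for t in go(i + 1, j + 1)]
--         return res
--     return set(go(0, 0))
-- ===== Notes on version B (the rewrite author's own statement) =====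
-- stated objective: faster
-- what changed: Replaces A's enumeration of all C(n, n-6) combinations of dash positions by a recursive subsequence matcher that generates only the maskings whose kept characters spell 'banana'.
import Mathlib
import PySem

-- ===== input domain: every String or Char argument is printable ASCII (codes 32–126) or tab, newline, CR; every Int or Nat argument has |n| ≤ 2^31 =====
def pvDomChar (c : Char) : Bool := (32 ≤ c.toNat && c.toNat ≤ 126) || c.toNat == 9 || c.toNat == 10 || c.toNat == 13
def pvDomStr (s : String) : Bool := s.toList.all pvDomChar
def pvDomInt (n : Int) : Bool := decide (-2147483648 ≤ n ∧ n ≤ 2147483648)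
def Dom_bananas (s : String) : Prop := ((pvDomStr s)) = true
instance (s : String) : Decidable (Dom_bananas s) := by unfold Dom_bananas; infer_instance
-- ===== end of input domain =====

-- B replaces A's scan of all C(n, n-6) dash-masks by a recursive subsequence matcher that
-- only generates the valid keep-position patterns (objective: faster). On len(s) < 6
-- both Pythons raise ValueError; Pre_bananas excludes those inputs.

-- ===== PORT A =====
-- itertools.combinations(xs, k): all k-element subsequences, lexicographic order (exact)
def pyCombos {α : Type} : List α → Nat → List (List α)
  | _, 0 => [[]]
  | [], _ + 1 => []
  | x :: rest, k + 1 => ((pyCombos rest k).map (fun c => x :: c)) ++ pyCombos rest (k + 1)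

def bananas (s : String) : List String :=
  let u := s.toList
  let check := "banana".toList
  let t : Int := (u.length : Int) - (check.length : Int)
  -- combinations(range(n), t) raises ValueError when t < 0 (i.e. len(s) < 6): excluded by Pre_bananas
  if t < 0 then [] else
  let A := pyCombos (List.range u.length) t.toNat
  A.foldl (fun result inst =>
    -- tmp_st built char by char; 'i in set(inst)' = membership in inst; s[i] with 0 ≤ i < len(s) is u.getD i ' ' (exact in range)
    let tmp := (List.range u.length).foldl
      (fun acc i => acc ++ [if i ∈ inst then '-' else u.getD i ' ']) []
    -- tmp_st.translate({ord('-'): None}) removes every '-' (exact)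
    if check = tmp.filter (fun c => c != '-') then PySem.Set.add result (String.ofList tmp) else result)
    (PySem.Set.empty : PySem.Set String)

-- ===== PORT B =====
-- go(i, j) from Source B, on the suffixes s[i:] and check[j:] as char lists
def goBan : List Char → List Char → List (List Char)
  | [], p => if p.length > 0 then [] else [[]]
  | c :: rest, p =>
    if p.length > rest.length + 1 then [] else
    ((goBan rest p).map (fun t => '-' :: t)) ++
    (match p with
     | [] => []
     | pc :: prest => if c = pc then (goBan rest prest).map (fun t => c :: t) else [])

def bananas_alt (s : String) : List String :=
  -- Source B raises ValueError when len(s) < 6 (excluded by Pre_bananas); the port is total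
  PySem.Set.ofList ((goBan s.toList "banana".toList).map String.ofList)

-- ===== PRECONDITION & SPEC =====
-- Pre_ excludes len(s) < 6, where both Pythons raise ValueError
def Pre_bananas (s : String) : Prop := 6 ≤ s.toList.length
instance (s : String) : Decidable (Pre_bananas s) := by unfold Pre_bananas; infer_instance
def pvWitness_bananas : String := "banana"

def Spec_bananas (s : String) (out : List String) : Prop := out = bananas_alt s
instance (s : String) (out : List String) : Decidable (Spec_bananas s out) := by unfold Spec_bananas; infer_instance

-- ===== CLAIM (what is proved, stated in full; the proofs are below) =====
def Claim_equal_bananas : Prop := ∀ (s : String), Dom_bananas s → Pre_bananas s → Spec_bananas s (bananas s)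

-- ===== LEMMAS AND PROOFS =====

-- all maskings of u with exactly k dashes, in A's (lexicographic-mask) order
def maskAll : List Char → Nat → List (List Char)
  | u, 0 => [u]
  | [], _ + 1 => []
  | c :: rest, k + 1 =>
    ((maskAll rest k).map (fun t => '-' :: t)) ++ ((maskAll rest (k + 1)).map (fun t => c :: t))

def maskOf (u : List Char) (inst : List Nat) : List Char :=
  (List.range u.length).map (fun i => if i ∈ inst then '-' else u.getD i ' ')

theorem foldl_push {α β : Type} (f : α → β) :
    ∀ (xs : List α) (acc : List β), xs.foldl (fun a i => a ++ [f i]) acc = acc ++ xs.map f := by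
  intro xs
  induction xs with
  | nil => intro acc; simp
  | cons x xs ih => intro acc; simp [List.foldl, ih]

theorem getD_range (u : List Char) (d : Char) :
    (List.range u.length).map (fun i => u.getD i d) = u := by
  induction u with
  | nil => simp
  | cons c rest ih =>
      simp only [List.length_cons, List.range_succ_eq_map, List.map_cons, List.map_map]
      refine congrArg₂ _ rfl ?_
      calc List.map ((fun i => (c :: rest).getD i d) ∘ Nat.succ) (List.range rest.length)
          = List.map (fun i => rest.getD i d) (List.range rest.length) := by
            apply List.map_congr_left; intro i _; simp [List.getD]
        _ = rest := ih

theorem pyCombos_map {α β : Type} (f : α → β) :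
    ∀ (xs : List α) (k : Nat), pyCombos (xs.map f) k = (pyCombos xs k).map (List.map f) := by
  intro xs
  induction xs with
  | nil => intro k; cases k <;> simp [pyCombos]
  | cons x xs ih =>
      intro k
      cases k with
      | zero => simp [pyCombos]
      | succ k => simp [pyCombos, ih, List.map_map, Function.comp]

theorem maskOf_nil_inst (u : List Char) : maskOf u [] = u := by
  unfold maskOf
  simpa using getD_range u ' '

theorem maskOf_cons_mask (c : Char) (rest : List Char) (inst : List Nat) :
    maskOf (c :: rest) (0 :: inst.map Nat.succ) = '-' :: maskOf rest inst := by
  unfold maskOf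
  simp only [List.length_cons, List.range_succ_eq_map, List.map_cons, List.map_map]
  refine congrArg₂ _ (by simp) ?_
  apply List.map_congr_left
  intro i _
  simp [Function.comp, List.getD]

theorem maskOf_cons_keep (c : Char) (rest : List Char) (inst : List Nat) :
    maskOf (c :: rest) (inst.map Nat.succ) = c :: maskOf rest inst := by
  unfold maskOf
  simp only [List.length_cons, List.range_succ_eq_map, List.map_cons, List.map_map]
  refine congrArg₂ _ ?_ ?_
  · have : (0 : Nat) ∉ inst.map Nat.succ := by simp
    simp [this, List.getD]
  · apply List.map_congr_left
    intro i _
    simp [Function.comp, List.getD]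

theorem maskAll_combos :
    ∀ (u : List Char) (k : Nat), (pyCombos (List.range u.length) k).map (maskOf u) = maskAll u k := by
  intro u
  induction u with
  | nil => intro k; cases k <;> simp [pyCombos, maskAll, maskOf_nil_inst]
  | cons c rest ih =>
      intro k
      cases k with
      | zero => simp [pyCombos, maskAll, maskOf_nil_inst]
      | succ k =>
          simp only [List.length_cons, List.range_succ_eq_map, pyCombos, maskAll,
            List.map_append, List.map_map, pyCombos_map]
          refine congrArg₂ _ ?_ ?_
          · rw [← ih k, List.map_map]; apply List.map_congr_left; intro inst _
            simp [Function.comp, maskOf_cons_mask]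
          · rw [← ih (k+1), List.map_map]; apply List.map_congr_left; intro inst _
            simp [Function.comp, maskOf_cons_keep]

theorem maskAll_gt : ∀ (u : List Char) (k : Nat), u.length < k → maskAll u k = [] := by
  intro u
  induction u with
  | nil => intro k h; cases k with | zero => omega | succ k => simp [maskAll]
  | cons c rest ih =>
      intro k h
      cases k with
      | zero => omega
      | succ k =>
          simp only [List.length_cons] at h
          simp [maskAll, ih k (by omega), ih (k+1) (by omega)]

theorem goBan_gt : ∀ (u p : List Char), u.length < p.length → goBan u p = [] := by
  intro u p h
  cases u with
  | nil =>
      simp only [List.length_nil] at h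
      simp only [goBan]; rw [if_pos (by omega)]
  | cons c rest =>
      simp only [List.length_cons] at h
      simp only [goBan]; rw [if_pos (by omega)]

theorem goBan_cons (c : Char) (rest p : List Char) :
    goBan (c :: rest) p = if p.length > rest.length + 1 then [] else
      ((goBan rest p).map (fun t => '-' :: t)) ++
      (match p with
       | [] => []
       | pc :: prest => if c = pc then (goBan rest prest).map (fun t => c :: t) else []) := rfl

theorem matchKeep (c : Char) (rest : List Char) (pc : Char) (prest : List Char) :
    (match pc :: prest with
     | [] => ([] : List (List Char))
     | pc' :: prest' => if c = pc' then (goBan rest prest').map (fun t => c :: t) else [])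
    = if c = pc then (goBan rest prest).map (fun t => c :: t) else [] := rfl

theorem filter_len_maskAll :
    ∀ (u : List Char) (k : Nat) (t : List Char), t ∈ maskAll u k →
      (t.filter (fun c => c != '-')).length + k ≤ u.length := by
  intro u
  induction u with
  | nil => intro k t ht; cases k with
      | zero => simp [maskAll] at ht; subst ht; simp
      | succ k => simp [maskAll] at ht
  | cons c rest ih =>
      intro k t ht
      cases k with
      | zero =>
          simp [maskAll] at ht; subst ht
          have := List.length_filter_le (fun c => c != '-') (c :: rest)
          simpa using this
      | succ k =>
          simp only [maskAll, List.mem_append, List.mem_map] at ht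
          rcases ht with ⟨t', ht', rfl⟩ | ⟨t', ht', rfl⟩
          · have := ih k t' ht'
            simp only [List.filter_cons]
            norm_num
            omega
          · have := ih (k+1) t' ht'
            simp only [List.filter_cons, List.length_cons]
            by_cases hc : (c != '-') = true <;> simp [hc] <;> omega

theorem maskAll_filter_eq_goBan :
    ∀ (u p : List Char), '-' ∉ p → p.length ≤ u.length →
      (maskAll u (u.length - p.length)).filter
        (fun t => decide (p = t.filter (fun c => c != '-'))) = goBan u p := by
  intro u
  induction u with
  | nil =>
      intro p hdash hlen
      have hp : p = [] := List.eq_nil_of_length_eq_zero (by simpa using hlen)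
      subst hp
      simp [maskAll, goBan]
  | cons c rest ih =>
      intro p hdash hlen
      simp only [List.length_cons] at hlen
      rw [goBan_cons, if_neg (by omega)]
      by_cases hk : p.length = rest.length + 1
      · have hz : (c :: rest).length - p.length = 0 := by simp only [List.length_cons]; omega
        rw [hz]
        rw [goBan_gt rest p (by omega)]
        simp only [List.map_nil, List.nil_append]
        cases p with
        | nil => simp at hk
        | cons pc prest =>
            have hpc : pc ≠ '-' := fun h => hdash (h ▸ List.mem_cons_self ..)
            simp only [List.length_cons] at hk
            by_cases hc : c = pc
            · subst hc
              have hdr : '-' ∉ prest := fun h => hdash (List.mem_cons_of_mem _ h)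
              have ihr := ih prest hdr (by omega)
              rw [(by omega : rest.length - prest.length = 0)] at ihr
              simp only [maskAll] at ihr ⊢
              rw [if_pos trivial, ← ihr]
              have hcne : (c != '-') = true := by simpa using hpc
              by_cases hp2 : prest = rest.filter (fun x => x != '-')
              · simp [hcne, hp2]
              · simp [hcne, hp2]
            · have hcond : ¬ (pc :: prest = (c :: rest).filter (fun x => x != '-')) := by
                intro he
                have hsub := List.filter_sublist (l := c :: rest) (p := fun x => x != '-')
                have hlf : ((c :: rest).filter (fun x => x != '-')).length = (c :: rest).length := by
                  rw [← he]; simp only [List.length_cons]; omega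
                have heq := hsub.eq_of_length hlf
                rw [heq] at he
                exact hc (by injection he with h1 _; exact h1.symm)
              rw [matchKeep, if_neg hc]
              simp [maskAll, hcond]
      · have hple : p.length ≤ rest.length := by omega
        rw [(by simp only [List.length_cons]; omega :
          (c :: rest).length - p.length = (rest.length - p.length) + 1)]
        simp only [maskAll, List.filter_append, List.filter_map]
        refine congrArg₂ _ ?_ ?_
        · rw [List.filter_congr (q := fun t => decide (p = t.filter (fun c => c != '-')))
            (by intro t _; simp [Function.comp]), ih p hdash hple]
        · cases p with
          | nil =>
              rw [maskAll_gt rest (rest.length - List.length [] + 1) (by simp)]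
              simp
          | cons pc prest =>
              have hpc : pc ≠ '-' := fun h => hdash (h ▸ List.mem_cons_self ..)
              simp only [List.length_cons] at hple
              rw [matchKeep]
              by_cases hc : c = pc
              · subst hc
                rw [if_pos rfl]
                have hdr : '-' ∉ prest := fun h => hdash (List.mem_cons_of_mem _ h)
                have hcne : (c != '-') = true := by simpa using hpc
                have ihr := ih prest hdr (by omega)
                rw [(by simp only [List.length_cons]; omega :
                  rest.length - (c :: prest).length + 1 = rest.length - prest.length)]
                rw [List.filter_congr (q := fun t => decide (prest = t.filter (fun c => c != '-')))
                  (by intro t _; simp [Function.comp, hcne]), ihr]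
              · rw [if_neg hc]
                rw [List.filter_eq_nil_iff.mpr, List.map_nil]
                intro t ht
                have hlf := filter_len_maskAll rest (rest.length - (pc :: prest).length + 1) t ht
                simp only [List.length_cons] at hlf
                by_cases hcd : c = '-'
                · subst hcd
                  simp only [Function.comp, List.filter_cons, show (('-' : Char) != '-') = false from by decide,
                    Bool.false_eq_true, if_false, decide_eq_true_eq]
                  intro he
                  have := congrArg List.length he
                  simp only [List.length_cons] at this
                  omega
                · have hcne : (c != '-') = true := by simpa using hcd
                  simp only [Function.comp, List.filter_cons, hcne, if_true, decide_eq_true_eq]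
                  intro he
                  exact hc (by injection he with h1 _; exact h1.symm)

theorem fold_add_eq_update {β : Type} (g : β → List Char) (P : List Char → Prop) [DecidablePred P] :
    ∀ (l : List β) (res : PySem.Set String),
      l.foldl (fun res inst =>
        if P (g inst) then PySem.Set.add res (String.ofList (g inst)) else res) res
      = PySem.Set.update res (((l.map g).filter (fun t => decide (P t))).map String.ofList) := by
  intro l
  induction l with
  | nil => intro res; simp [PySem.Set.update]
  | cons b l ih =>
      intro res
      by_cases hP : P (g b)
      · rw [List.foldl_cons, if_pos hP, ih]
        simp [hP, PySem.Set.update]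
      · rw [List.foldl_cons, if_neg hP, ih]
        simp [hP, PySem.Set.update]

-- ===== VERDICT (by name: the statement is the Claim_ definition above) =====
theorem bananas_spec : Claim_equal_bananas := by
  intro s _ hpre
  have hpre' : 6 ≤ s.toList.length := hpre
  have hb : ("banana".toList).length = 6 := by decide
  have hb2 : (['b','a','n','a','n','a'] : List Char).length = 6 := by decide
  unfold Spec_bananas bananas bananas_alt
  simp only []
  rw [if_neg (by push_cast; omega)]
  rw [show (((s.toList.length : Int)) - (("banana".toList.length : Nat) : Int)).toNat
      = s.toList.length - "banana".toList.length from by omega]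
  rw [fold_add_eq_update
    (fun inst => (List.range s.toList.length).foldl
      (fun acc i => acc ++ [if i ∈ inst then '-' else s.toList.getD i ' ']) [])
    (fun tmp => "banana".toList = tmp.filter (fun c => c != '-'))]
  rw [show (pyCombos (List.range s.toList.length) (s.toList.length - "banana".toList.length)).map
      (fun inst => (List.range s.toList.length).foldl
        (fun acc i => acc ++ [if i ∈ inst then '-' else s.toList.getD i ' ']) [])
      = (pyCombos (List.range s.toList.length) (s.toList.length - "banana".toList.length)).map
        (maskOf s.toList) from
    List.map_congr_left (fun inst _ => by rw [foldl_push]; simp [maskOf])]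
  rw [maskAll_combos]
  rw [show s.toList.length - "banana".toList.length
      = s.toList.length - ("banana".toList).length from rfl]
  rw [maskAll_filter_eq_goBan s.toList "banana".toList (by decide)
    (by omega)]
  rfl
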